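-- pv_equiv track=rewrite | github.com/SanjeevBashyal/foobar | My Solutions/Level 4/escape.py | bunnies_transfer_to_intermediate_rooms
-- ===== SOURCE A (Python) =====
-- def bunnies_transfer_to_intermediate_rooms(room_status,path_i,bunnies_left):
--     non_zero_path=[[path_i[i],i] for i in range(len(path_i)) if path_i[i]!=0]
--     non_zero_path.sort()
--     transfer_scheme=[0]*len(path_i)
--     sufficient_flag=1
--     for i in range(len(non_zero_path)):
--         if bunnies_left<non_zero_path[i][0]:
--             transfer_scheme[non_zero_path[i][1]]=bunnies_left
--             sufficient_flag=0
--             bunnies_left=0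
--             break
--         else:
--             transfer_scheme[non_zero_path[i][1]]=non_zero_path[i][0]
--             bunnies_left=bunnies_left-non_zero_path[i][0]
--     return transfer_scheme, sufficient_flag, bunnies_left
-- ===== SOURCE B (Python) =====
-- def bunnies_transfer_to_intermediate_rooms(room_status, path_i, bunnies_left):
--     rooms = sorted((c, i) for i, c in enumerate(path_i) if c != 0)
--     prefix = []
--     total = 0
--     for c, _ in rooms:
--         total += c
--         prefix.append(total)
--     cutoff = next((k for k, p in enumerate(prefix) if p > bunnies_left), None)
--     scheme = [0] * len(path_i)
--     if cutoff is None: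
--         for c, i in rooms:
--             scheme[i] = c
--         return scheme, 1, bunnies_left - total
--     for c, i in rooms[:cutoff]:
--         scheme[i] = c
--     base = prefix[cutoff - 1] if cutoff > 0 else 0
--     scheme[rooms[cutoff][1]] = bunnies_left - base
--     return scheme, 0, 0
-- ===== Notes on version B (the rewrite author's own statement) =====
-- stated objective: alternative
-- what changed: Replaces A's stateful greedy loop with early break by a prefix-sum table over the sorted capacities: the first prefix exceeding bunnies_left locates the threshold room, rooms before it are assigned in bulk and the remainder is computed from the table, with no running bunnies_left mutation.
import Mathlib
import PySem

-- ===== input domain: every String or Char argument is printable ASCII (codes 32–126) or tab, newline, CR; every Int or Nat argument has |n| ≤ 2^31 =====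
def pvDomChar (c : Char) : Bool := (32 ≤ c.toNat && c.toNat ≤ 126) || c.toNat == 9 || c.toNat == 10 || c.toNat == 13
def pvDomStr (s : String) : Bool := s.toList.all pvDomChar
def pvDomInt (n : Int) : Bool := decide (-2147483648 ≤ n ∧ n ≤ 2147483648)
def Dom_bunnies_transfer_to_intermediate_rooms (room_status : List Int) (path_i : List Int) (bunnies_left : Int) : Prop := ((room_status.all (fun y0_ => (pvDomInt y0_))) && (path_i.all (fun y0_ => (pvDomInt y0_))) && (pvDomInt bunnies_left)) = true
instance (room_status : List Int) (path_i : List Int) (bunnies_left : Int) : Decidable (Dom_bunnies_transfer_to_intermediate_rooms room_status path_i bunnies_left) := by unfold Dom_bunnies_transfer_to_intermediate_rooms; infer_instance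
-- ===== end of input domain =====

-- B replaces A's stateful greedy loop (running bunnies_left, early break) by a prefix-sum
-- table over the sorted capacities plus a threshold search; objective: alternative algorithm.

-- ===== PORT A =====
-- non_zero_path = [[path_i[i], i] for i in range(len(path_i)) if path_i[i] != 0]; .sort()
def pvA_rooms (path_i : List Int) : List (Int × Int) :=
  PySem.List.sorted2
    (((PySem.List.pyRange 0 path_i.length 1).filter
        (fun i => decide (PySem.List.pyGetD path_i i 0 ≠ 0))).map
      (fun i => (PySem.List.pyGetD path_i i 0, i)))
    (fun p => p.1) (fun p => p.2)

-- the for-loop over non_zero_path with its break, carrying (transfer_scheme, bunnies_left)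
def pvA_loop : List (Int × Int) → List Int → Int → List Int × Int × Int
  | [], ts, bl => (ts, 1, bl)
  | (c, j) :: rest, ts, bl =>
    if bl < c then (ts.set j.toNat bl, 0, 0)
    else pvA_loop rest (ts.set j.toNat c) (bl - c)

def bunnies_transfer_to_intermediate_rooms (room_status : List Int) (path_i : List Int) (bunnies_left : Int) : List Int × Int × Int :=
  pvA_loop (pvA_rooms path_i) (List.replicate path_i.length 0) bunnies_left

-- ===== PORT B =====
-- rooms = sorted((c, i) for i, c in enumerate(path_i) if c != 0)
def pvB_rooms (path_i : List Int) : List (Int × Int) :=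
  PySem.List.sorted2
    (((PySem.List.enumerate path_i).filter (fun p => decide (p.2 ≠ 0))).map
      (fun p => (p.2, p.1)))
    (fun p => p.1) (fun p => p.2)

-- the prefix-sum loop: returns (prefix, total)
def pvB_prefix : List (Int × Int) → Int → List Int × Int
  | [], t => ([], t)
  | (c, _) :: rest, t => ((t + c) :: (pvB_prefix rest (t + c)).1, (pvB_prefix rest (t + c)).2)

-- 'for c, i in rooms: scheme[i] = c'
def pvB_fill (rooms : List (Int × Int)) (ts : List Int) : List Int :=
  rooms.foldl (fun acc p => acc.set p.2.toNat p.1) ts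

-- threshold search + bulk assignment, from fresh scheme ts
def pvB_core (rooms : List (Int × Int)) (ts : List Int) (bl : Int) : List Int × Int × Int :=
  let pr := pvB_prefix rooms 0
  match pr.1.findIdx? (fun p => decide (bl < p)) with
  | none => (pvB_fill rooms ts, 1, bl - pr.2)
  | some k =>
    let base := if k = 0 then 0 else pr.1.getD (k - 1) 0
    let room := rooms.getD k (0, 0)
    ((pvB_fill (rooms.take k) ts).set room.2.toNat (bl - base), 0, 0)

def bunnies_transfer_to_intermediate_rooms_alt (room_status : List Int) (path_i : List Int) (bunnies_left : Int) : List Int × Int × Int :=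
  pvB_core (pvB_rooms path_i) (List.replicate path_i.length 0) bunnies_left

-- ===== PRECONDITION & SPEC =====
def Spec_bunnies_transfer_to_intermediate_rooms (room_status : List Int) (path_i : List Int) (bunnies_left : Int) (out : List Int × Int × Int) : Prop := out = bunnies_transfer_to_intermediate_rooms_alt room_status path_i bunnies_left
instance (room_status : List Int) (path_i : List Int) (bunnies_left : Int) (out : List Int × Int × Int) : Decidable (Spec_bunnies_transfer_to_intermediate_rooms room_status path_i bunnies_left out) := by unfold Spec_bunnies_transfer_to_intermediate_rooms; infer_instance

-- ===== CLAIM (what is proved, stated in full; the proofs are below) =====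
def Claim_equal_bunnies_transfer_to_intermediate_rooms : Prop := ∀ (room_status : List Int) (path_i : List Int) (bunnies_left : Int), Dom_bunnies_transfer_to_intermediate_rooms room_status path_i bunnies_left → Spec_bunnies_transfer_to_intermediate_rooms room_status path_i bunnies_left (bunnies_transfer_to_intermediate_rooms room_status path_i bunnies_left)

-- ===== LEMMAS AND PROOFS =====

-- the two ports sort the same non-zero (capacity, index) list
theorem pv_rooms_eq (path_i : List Int) : pvA_rooms path_i = pvB_rooms path_i := by
  unfold pvA_rooms pvB_rooms
  congr 1
  rw [PySem.List.enumerate_eq_map_pyRange (d := 0), List.filter_map, List.map_map]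
  rfl

-- shifting the prefix-sum accumulator
theorem pv_prefix_shift (rooms : List (Int × Int)) (t : Int) :
    pvB_prefix rooms t = ((pvB_prefix rooms 0).1.map (fun p => t + p), t + (pvB_prefix rooms 0).2) := by
  induction rooms generalizing t with
  | nil => simp [pvB_prefix]
  | cons hd tl ih =>
    obtain ⟨c, j⟩ := hd
    simp only [pvB_prefix, ih (t + c), ih c, Prod.mk.injEq, List.map_cons,
      List.map_map, zero_add]
    constructor
    · congr 1
      exact List.map_congr_left fun x _ => by simp [Function.comp]; ring
    · ring

theorem pv_loop_eq_core (rooms : List (Int × Int)) :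
    ∀ (ts : List Int) (bl : Int), pvA_loop rooms ts bl = pvB_core rooms ts bl := by
  induction rooms with
  | nil => intro ts bl; simp [pvA_loop, pvB_core, pvB_prefix, pvB_fill]
  | cons hd tl ih =>
    obtain ⟨c, j⟩ := hd
    intro ts bl
    have hpfx := pv_prefix_shift tl c
    by_cases h : bl < c
    · simp [pvA_loop, pvB_core, pvB_prefix, pvB_fill, List.findIdx?_cons, h]
    · have hcore : pvB_core ((c, j) :: tl) ts bl = pvB_core tl (ts.set j.toNat c) (bl - c) := by
        unfold pvB_core
        simp only [pvB_prefix, Int.zero_add, hpfx, List.findIdx?_cons, decide_eq_true_eq, h,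
          if_false, List.findIdx?_map]
        have hco : ((fun p => decide (bl < p)) ∘ (fun p => c + p)) = (fun p => decide (bl - c < p)) := by
          funext x; simp only [Function.comp]; simp only [decide_eq_decide]; omega
        rw [hco]
        cases hfind : (pvB_prefix tl 0).1.findIdx? (fun p => decide (bl - c < p)) with
        | none =>
          simp only [Option.map_none]
          have h3 : bl - (c + (pvB_prefix tl 0).2) = bl - c - (pvB_prefix tl 0).2 := by ring
          rw [h3]
          rfl
        | some k =>
          simp only [Option.map_some]
          have hk : k < (pvB_prefix tl 0).1.length := by
            have := List.findIdx?_eq_some_iff_findIdx_eq.mp hfind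
            exact this.1
          cases k with
          | zero =>
            simp only [Nat.zero_add]
            simp [pvB_fill]
          | succ m =>
            have hm : m < (pvB_prefix tl 0).1.length := by omega
            have hbase : ((pvB_prefix tl 0).1.map (fun p => c + p)).getD m 0
                = c + (pvB_prefix tl 0).1.getD m 0 := by
              rw [List.getD_eq_getElem _ _ (by simpa using hm), List.getD_eq_getElem _ _ hm]
              simp
            simp only [List.take_succ_cons, List.getD_cons_succ, Nat.add_sub_cancel,
              if_neg (Nat.succ_ne_zero (m + 1)), if_neg (Nat.succ_ne_zero m), hbase,
              pvB_fill, List.foldl_cons]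
            have hv : bl - (c + (pvB_prefix tl 0).1.getD m 0)
                = bl - c - (pvB_prefix tl 0).1.getD m 0 := by ring
            rw [hv]
      rw [hcore, ← ih]
      simp [pvA_loop, h]

-- ===== VERDICT (by name: the statement is the Claim_ definition above) =====
theorem bunnies_transfer_to_intermediate_rooms_spec : Claim_equal_bunnies_transfer_to_intermediate_rooms := by
  intro room_status path_i bunnies_left _
  unfold Spec_bunnies_transfer_to_intermediate_rooms
  unfold bunnies_transfer_to_intermediate_rooms bunnies_transfer_to_intermediate_rooms_alt
  rw [pv_rooms_eq, pv_loop_eq_core]
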